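-- pv_equiv track=rewrite | github.com/mazariks/ITI0102 | iti0102-2020-master/EX/ex09_meta/meta.py | apply_dragon_rules
-- ===== SOURCE A (Python) =====
-- def apply_dragon_rules(string):
--     """
--     Write a recursive function that replaces characters in string.
--
--     Like so:
--         "a" -> "aRbFR"
--         "b" -> "LFaLb"
--     apply_dragon_rules("a") -> "aRbFR"
--     apply_dragon_rules("aa") -> "aRbFRaRbFR"
--     apply_dragon_rules("FRaFRb") -> "FRaRbFRFRLFaLb"
--
--     :param string: sentence with "a" and "b" characters that need to be replaced
--     :return: new sentence with "a" and "b" characters replaced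
--     """
--     string_to_replace = ""
--     if len(string) > 0:
--         if string[0] == 'a':
--             string_to_replace += "aRbFR"
--             return string_to_replace + apply_dragon_rules(string[1:])
--         elif string[0] == 'b':
--             string_to_replace += "LFaLb"
--             return string_to_replace + apply_dragon_rules(string[1:])
--         else:
--             string_to_replace += string[0]
--             return string_to_replace + apply_dragon_rules(string[1:])
--     else:
--         return string_to_replace
-- ===== SOURCE B (Python) =====
-- def apply_dragon_rules(string):
--     out = []
--     for ch in string:
--         if ch == 'a':
--             out.append("aRbFR")
--         elif ch == 'b':
--             out.append("LFaLb")
--         else: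
--             out.append(ch)
--     return "".join(out)
-- ===== Notes on version B (the rewrite author's own statement) =====
-- stated objective: faster
-- what changed: Per-character recursion with repeated string slicing and concatenation is replaced by an iterative for-loop that appends each replacement to a list and joins once at the end.
import Mathlib
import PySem

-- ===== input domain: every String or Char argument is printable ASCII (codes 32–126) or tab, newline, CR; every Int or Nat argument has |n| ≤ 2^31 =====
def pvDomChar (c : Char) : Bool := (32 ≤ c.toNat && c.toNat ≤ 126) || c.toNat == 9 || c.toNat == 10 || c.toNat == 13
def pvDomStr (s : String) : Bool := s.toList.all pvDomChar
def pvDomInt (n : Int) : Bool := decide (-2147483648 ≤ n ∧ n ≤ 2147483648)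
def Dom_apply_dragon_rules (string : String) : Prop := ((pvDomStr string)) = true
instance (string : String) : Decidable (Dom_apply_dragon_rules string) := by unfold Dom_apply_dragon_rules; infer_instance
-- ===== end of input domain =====

-- B replaces A's per-character recursion (with slicing and concatenation) by an
-- iterative loop that appends each replacement to a list and joins once (idiomatic).

-- ===== PORT A =====
-- A's recursion on string[0] / string[1:], transcribed on the character list.
def dragonRecA : List Char → String
  | [] => ""                                   -- len(string) == 0: return ""
  | c :: rest =>
      if c = 'a' then "aRbFR" ++ dragonRecA rest
      else if c = 'b' then "LFaLb" ++ dragonRecA rest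
      else String.ofList [c] ++ dragonRecA rest

def apply_dragon_rules (string : String) : String := dragonRecA string.toList

-- ===== PORT B =====
-- B's for-loop appending to a list `out`, then "".join(out).
def apply_dragon_rules_alt (string : String) : String :=
  String.join
    (string.toList.foldl
      (fun out ch =>
        if ch = 'a' then out ++ ["aRbFR"]
        else if ch = 'b' then out ++ ["LFaLb"]
        else out ++ [String.ofList [ch]])
      [])

-- ===== PRECONDITION & SPEC =====
def Spec_apply_dragon_rules (string : String) (out : String) : Prop := out = apply_dragon_rules_alt string
instance (string : String) (out : String) : Decidable (Spec_apply_dragon_rules string out) := by unfold Spec_apply_dragon_rules; infer_instance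

-- ===== CLAIM (what is proved, stated in full; the proofs are below) =====
def Claim_equal_apply_dragon_rules : Prop := ∀ (string : String), Dom_apply_dragon_rules string → Spec_apply_dragon_rules string (apply_dragon_rules string)

-- ===== LEMMAS AND PROOFS =====
theorem dragon_loop_eq (l : List Char) (acc : List String) :
    String.join
      (l.foldl
        (fun out ch =>
          if ch = 'a' then out ++ ["aRbFR"]
          else if ch = 'b' then out ++ ["LFaLb"]
          else out ++ [String.ofList [ch]])
        acc) = String.join acc ++ dragonRecA l := by
  induction l generalizing acc with
  | nil => simp [dragonRecA]
  | cons c rest ih =>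
      simp only [List.foldl_cons, dragonRecA]
      split_ifs <;> rw [ih] <;> simp [String.join, String.append_assoc]

-- ===== VERDICT (by name: the statement is the Claim_ definition above) =====
theorem apply_dragon_rules_spec : Claim_equal_apply_dragon_rules := by
  intro s _
  unfold Spec_apply_dragon_rules apply_dragon_rules apply_dragon_rules_alt
  rw [dragon_loop_eq]
  simp [String.join]
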